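-- pv_equiv track=rewrite | github.com/Fat-pig-Cui/misc-code | MatchDecode.py | decodeMatch
-- ===== SOURCE A (Python) =====
-- LEN = 36  # 数字10位 + 小写字母26位
--
-- OFFSET = 17  # 编码偏移量的一部分
--
-- code_0 = ord('0')  # 四种字符的 ASCII 编码
--
-- code_9 = ord('9')
--
-- code_a = ord('a')
--
-- code_z = ord('z')
--
-- def decodeMatch(string):
--     asc = []
--     result = ''
--     for char in string:  # str 字符串重新编码
--         if code_0 <= ord(char) <= code_9:  # 将 字符0-9 映射到 下标0-9
--             asc.append(ord(char) - code_0)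
--         elif code_a <= ord(char) <= code_z:  # 将 字符a-z 映射到 下标10-35, 减 10 是因为数字0-9排在字母a-z前面
--             asc.append(ord(char) - code_a + 10)
--         else:
--             asc.append(ord(char))
--
--     for i in range(0, len(asc)):
--         if asc[i] != ord('-'):
--             # 核心代码, 循环左移 OFFSET + i
--             # 又加上 2 * LEN 是因为前面的值可能会是负的, 而取模不会改变正负
--             asc[i] = int(asc[i] - OFFSET - i + LEN * 2) % LEN
--
--     for data in asc:
--         if 0 <= data <= 9:
--             result += chr(data + code_0)
--         elif 10 <= data < LEN:
--             result += chr(data + code_a - 10)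
--         else:
--             result += chr(data)
--
--     return result
-- ===== SOURCE B (Python) =====
-- def _decode(r, o):
--     """Decoded character for input code o occurring at a position congruent to r (mod 36)."""
--     if 48 <= o <= 57:
--         idx = o - 48
--     elif 97 <= o <= 122:
--         idx = o - 97 + 10
--     else:
--         idx = o
--     if idx != 45:
--         idx = (idx - 17 - r + 72) % 36
--     if 0 <= idx <= 9:
--         return chr(idx + 48)
--     elif 10 <= idx < 36:
--         return chr(idx + 87)
--     return chr(idx)
--
-- def decodeMatch(string):
--     # table-driven: since the shift depends on the position only through i % 36,
--     # precompute 36 translation tables (one per residue) over the ASCII codes,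
--     # then decoding is a pure table lookup per character.
--     table = [[_decode(r, o) for o in range(128)] for r in range(36)]
--     out = []
--     for i, c in enumerate(string):
--         out.append(table[i % 36][ord(c)])
--     return ''.join(out)
-- ===== Notes on version B (the rewrite author's own statement) =====
-- stated objective: faster
-- what changed: B replaces A's per-character arithmetic pipeline (encode to base-36 index, position-dependent modular shift, decode back) by 36 precomputed ASCII translation tables indexed by position residue i % 36, so the per-character work is a pure table lookup and the result is joined once instead of built by repeated string concatenation; correct because the shift depends on the position only through i mod 36.
import Mathlib
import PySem

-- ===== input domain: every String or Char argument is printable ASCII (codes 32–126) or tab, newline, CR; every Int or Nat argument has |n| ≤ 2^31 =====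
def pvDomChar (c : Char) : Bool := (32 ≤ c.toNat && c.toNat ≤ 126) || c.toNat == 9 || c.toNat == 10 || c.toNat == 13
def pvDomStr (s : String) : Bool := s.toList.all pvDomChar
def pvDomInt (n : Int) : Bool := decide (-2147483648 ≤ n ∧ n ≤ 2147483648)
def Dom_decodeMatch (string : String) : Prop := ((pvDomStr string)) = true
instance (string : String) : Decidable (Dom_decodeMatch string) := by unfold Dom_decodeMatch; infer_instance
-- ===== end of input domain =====

-- B replaces A's per-character arithmetic pipeline by 36 precomputed ASCII translation
-- tables indexed by the position residue i % 36, with a single join; objective: faster (constant factor, measured).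

-- ===== PORT A =====
-- first loop: map a char to its index (digits → 0–9, a–z → 10–35, else raw ord)
def pvAEnc (c : Char) : Int :=
  if 48 ≤ (c.toNat : Int) ∧ (c.toNat : Int) ≤ 57 then (c.toNat : Int) - 48
  else if 97 ≤ (c.toNat : Int) ∧ (c.toNat : Int) ≤ 122 then (c.toNat : Int) - 97 + 10
  else (c.toNat : Int)

-- second loop: for i in range(len(asc)): if asc[i] != 45: asc[i] = (asc[i]-17-i+72) % 36
-- (each iteration touches exactly element i, rendered as structural recursion carrying i)
def pvAShift : Int → List Int → List Int
  | _, [] => []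
  | i, x :: xs =>
      (if x ≠ 45 then PySem.Int.mod (x - 17 - i + 72) 36 else x) :: pvAShift (i + 1) xs

-- third loop: decode an index back to a char
def pvADec (d : Int) : Char :=
  if 0 ≤ d ∧ d ≤ 9 then Char.ofNat (d + 48).toNat
  else if 10 ≤ d ∧ d < 36 then Char.ofNat (d + 97 - 10).toNat
  else Char.ofNat d.toNat

def decodeMatch (string : String) : String :=
  let asc := string.toList.foldl (fun acc c => acc ++ [pvAEnc c]) []
  let asc := pvAShift 0 asc
  asc.foldl (fun result d => result.push (pvADec d)) ""

-- ===== PORT B =====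
-- Source B's _decode(r, o): decoded character for code o at a position ≡ r (mod 36)
def pvBDec (r o : Int) : Char :=
  let idx :=
    if 48 ≤ o ∧ o ≤ 57 then o - 48
    else if 97 ≤ o ∧ o ≤ 122 then o - 97 + 10
    else o
  let idx := if idx ≠ 45 then PySem.Int.mod (idx - 17 - r + 72) 36 else idx
  if 0 ≤ idx ∧ idx ≤ 9 then Char.ofNat (idx + 48).toNat
  else if 10 ≤ idx ∧ idx < 36 then Char.ofNat (idx + 87).toNat
  else Char.ofNat idx.toNat

-- the 36 per-residue translation tables over the ASCII codes 0..127
def pvTable : List (List Char) :=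
  (List.range 36).map (fun r => (List.range 128).map (fun o => pvBDec (Int.ofNat r) (Int.ofNat o)))

def decodeMatch_alt (string : String) : String :=
  String.ofList ((PySem.List.enumerate string.toList).foldl
    (fun out p => out ++ [(pvTable[(PySem.Int.mod p.1 36).toNat]!)[p.2.toNat]!]) [])

-- ===== PRECONDITION & SPEC =====
def Spec_decodeMatch (string : String) (out : String) : Prop := out = decodeMatch_alt string
instance (string : String) (out : String) : Decidable (Spec_decodeMatch string out) := by unfold Spec_decodeMatch; infer_instance

-- ===== CLAIM (what is proved, stated in full; the proofs are below) =====
def Claim_equal_decodeMatch : Prop := ∀ (string : String), Dom_decodeMatch string → Spec_decodeMatch string (decodeMatch string)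

-- ===== LEMMAS AND PROOFS =====

-- position-shift arithmetic: the shift depends on i only through i % 36
theorem pv_modshift' (x i : Int) :
    (x - 17 - i % 36 + 72) % 36 = (x - 17 - i + 72) % 36 := by omega

-- the table entry at residue i % 36 and code c is exactly A's encode–shift–decode of c at position i
theorem pv_lookup (i : Int) (c : Char) (hc : c.toNat < 128) :
    (pvTable[(PySem.Int.mod i 36).toNat]!)[c.toNat]!
      = pvADec (if pvAEnc c ≠ 45 then PySem.Int.mod (pvAEnc c - 17 - i + 72) 36 else pvAEnc c) := by
  have hm : PySem.Int.mod i 36 = i % 36 := PySem.Int.mod_eq_emod_of_pos (by norm_num : (0:Int) < 36)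
  have h0 : 0 ≤ i % 36 := Int.emod_nonneg i (by norm_num)
  have h1 : i % 36 < 36 := Int.emod_lt_of_pos i (by norm_num)
  have hr : (PySem.Int.mod i 36).toNat < 36 := by omega
  have htab : pvTable[(PySem.Int.mod i 36).toNat]!
      = (List.range 128).map (fun o => pvBDec (Int.ofNat (PySem.Int.mod i 36).toNat) (Int.ofNat o)) := by
    rw [getElem!_pos pvTable (PySem.Int.mod i 36).toNat
        (show (PySem.Int.mod i 36).toNat < pvTable.length by simpa [pvTable] using hr)]
    simp [pvTable]
  rw [htab, getElem!_pos
      ((List.range 128).map (fun o => pvBDec (Int.ofNat (PySem.Int.mod i 36).toNat) (Int.ofNat o)))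
      c.toNat (by simpa using hc)]
  have hcast : (Int.ofNat (PySem.Int.mod i 36).toNat) = PySem.Int.mod i 36 := by
    rw [hm]; exact_mod_cast Int.toNat_of_nonneg h0
  have h8797 : ∀ m : Int, m + 97 - 10 = m + 87 := fun m => by ring
  simp only [List.getElem_map, List.getElem_range, hcast]
  simp only [pvBDec, pvAEnc, pvADec, pv_modshift', ne_eq, ite_not, Int.ofNat_eq_natCast,
    PySem.Int.mod_eq_emod_of_pos (by norm_num : (0:Int) < 36), h8797]

-- main loop invariant: B's enumerate-lookup pass equals A's shift-then-decode of the encoded list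
theorem pv_main (cs : List Char) (i : Int) (hcs : ∀ c ∈ cs, c.toNat < 128) :
    (PySem.List.enumerate cs i).map
        (fun p => (pvTable[(PySem.Int.mod p.1 36).toNat]!)[p.2.toNat]!)
      = (pvAShift i (cs.map pvAEnc)).map pvADec := by
  induction cs generalizing i with
  | nil => simp [pvAShift]
  | cons c cs ih =>
      have hc := hcs c (by simp)
      have := pv_lookup i c hc
      simp only [List.map_cons, pvAShift, PySem.List.enumerate_cons, List.map]
      refine congrArg₂ _ ?_ (ih (i + 1) (fun d hd => hcs d (by simp [hd])))
      simpa using this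

-- A's third loop (string.push fold) builds ofList of the mapped list
theorem pvA_push_foldl (ds : List Int) (l : List Char) :
    ds.foldl (fun result d => result.push (pvADec d)) (String.ofList l)
      = String.ofList (l ++ ds.map pvADec) := by
  induction ds generalizing l with
  | nil => simp
  | cons d ds ih =>
      have hp : (String.ofList l).push (pvADec d) = String.ofList (l ++ [pvADec d]) := by
        apply String.toList_inj.mp; simp
      simpa [hp] using ih (l ++ [pvADec d])

-- ===== VERDICT (by name: the statement is the Claim_ definition above) =====
theorem decodeMatch_spec : Claim_equal_decodeMatch := by
  intro s hdom
  show decodeMatch s = decodeMatch_alt s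
  have hcs : ∀ c ∈ s.toList, c.toNat < 128 := by
    intro c hc
    have := List.all_eq_true.mp hdom c hc
    simp [pvDomChar] at this
    omega
  simp only [decodeMatch, decodeMatch_alt,
    PySem.List.foldl_append_singleton_eq_map, List.nil_append]
  have h1 : ("" : String) = String.ofList [] := by
    apply String.toList_inj.mp; simp
  rw [h1, pvA_push_foldl, ← pv_main s.toList 0 hcs]
  simp
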